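-- pv_equiv track=rewrite | github.com/P0rtOs/BIS | lab4/lab4.py | hex_u64
-- ===== SOURCE A (Python) =====
-- MASK64 = (1 << 64) - 1
--
-- def hex_u64(x: int) -> str:
--     x &= MASK64
--     hexchars = "0123456789ABCDEF"
--     s = ["0"] * 16
--     for i in range(15, -1, -1):
--         s[i] = hexchars[x & 0xF]
--         x >>= 4
--     return "".join(s)
-- ===== SOURCE B (Python) =====
-- MASK64 = (1 << 64) - 1
--
-- def hex_u64(x: int) -> str:
--     return format(x & MASK64, "016X")
-- ===== Notes on version B (the rewrite author's own statement) =====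
-- stated objective: idiomatic
-- what changed: B replaces the hand-rolled 16-iteration nibble-extraction loop and list buffer with a single built-in format(x & MASK64, '016X') call.
import Mathlib
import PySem

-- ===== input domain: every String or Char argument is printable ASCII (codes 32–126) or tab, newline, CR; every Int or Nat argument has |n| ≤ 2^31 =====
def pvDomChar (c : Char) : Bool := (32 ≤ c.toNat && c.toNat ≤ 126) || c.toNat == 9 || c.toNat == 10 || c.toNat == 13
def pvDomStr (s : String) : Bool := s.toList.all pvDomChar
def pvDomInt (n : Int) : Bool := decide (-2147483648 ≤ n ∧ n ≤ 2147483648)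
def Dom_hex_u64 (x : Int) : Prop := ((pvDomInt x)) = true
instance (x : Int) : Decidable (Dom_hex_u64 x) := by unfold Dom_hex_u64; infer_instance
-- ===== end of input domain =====

-- B replaces the hand-rolled 16-iteration nibble-extraction loop and list buffer
-- with a single built-in format(x & MASK64, '016X') call.

-- uppercase hex digit table; A's local `hexchars` string, also the digit alphabet of format's 'X'
def pvHexChars : List Char := "0123456789ABCDEF".toList

-- ===== PORT A =====
-- x & MASK64 (mask = 2^64-1, x possibly negative) is exactly x mod 2^64; Lean's Int.emod
-- matches Python's % for a positive divisor.  The loop state x is nonnegative from then on,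
-- so it is carried as a Nat; x & 0xF = x % 16 and x >> 4 = x / 16 on nonnegative x (exact).
def hex_u64 (x : Int) : String :=
  let n : Nat := (x.emod (2 ^ 64)).toNat
  let s : List Char := List.replicate 16 '0'
  let r := (PySem.List.pyRange 15 (-1) (-1)).foldl
    (fun (st : List Char × Nat) i =>
      (st.1.set i.toNat (pvHexChars.getD (st.2 % 16) '0'), st.2 / 16)) (s, n)
  String.mk r.1

-- ===== PORT B =====
-- hand port of Python's built-in format(n, 'X') for nonnegative n: most-significant-first
-- hex digits by repeated division ("0" for n = 0); exact on Nat.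
def pvHexRec (n : Nat) : List Char :=
  if n = 0 then [] else pvHexRec (n / 16) ++ [pvHexChars.getD (n % 16) '0']
decreasing_by exact Nat.div_lt_self (Nat.pos_of_ne_zero (by assumption)) (by norm_num)

-- format(x & MASK64, "016X"): digits of the masked value, zero-padded on the left to width 16
def hex_u64_alt (x : Int) : String :=
  let n : Nat := (x.emod (2 ^ 64)).toNat
  let ds : List Char := if n = 0 then ['0'] else pvHexRec n
  String.mk (List.replicate (16 - ds.length) '0' ++ ds)

-- ===== PRECONDITION & SPEC =====
def Spec_hex_u64 (x : Int) (out : String) : Prop := out = hex_u64_alt x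
instance (x : Int) (out : String) : Decidable (Spec_hex_u64 x out) := by unfold Spec_hex_u64; infer_instance

-- ===== CLAIM (what is proved, stated in full; the proofs are below) =====
def Claim_equal_hex_u64 : Prop := ∀ (x : Int), Dom_hex_u64 x → Spec_hex_u64 x (hex_u64 x)

-- ===== LEMMAS AND PROOFS =====

-- k least-significant base-16 digit characters of n, most significant first
def pvDigitsK : Nat → Nat → List Char
  | 0, _ => []
  | k + 1, n => pvDigitsK k (n / 16) ++ [pvHexChars.getD (n % 16) '0']

theorem pvDigitsK_zero (k : Nat) : pvDigitsK k 0 = List.replicate k '0' := by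
  induction k with
  | zero => rfl
  | succ k ih => simp [pvDigitsK, ih, List.replicate_succ' (n := k), pvHexChars]

theorem pvHexRec_pad (k n : Nat) (h : n < 16 ^ k) :
    List.replicate (k - (pvHexRec n).length) '0' ++ pvHexRec n = pvDigitsK k n := by
  induction k generalizing n with
  | zero =>
    interval_cases n
    simp [pvHexRec, pvDigitsK]
  | succ k ih =>
    rw [pvHexRec]
    by_cases h0 : n = 0
    · subst h0
      simp [pvDigitsK_zero, List.replicate_succ' (n := k)]
    · simp only [if_neg h0, List.length_append, List.length_singleton]
      have hn : n / 16 < 16 ^ k := by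
        rw [Nat.div_lt_iff_lt_mul (by norm_num)]
        calc n < 16 ^ (k + 1) := h
        _ = 16 ^ k * 16 := by ring
      have := ih (n / 16) hn
      rw [pvDigitsK, ← this, Nat.succ_sub_succ]
      simp

theorem pvRange_eval :
    PySem.List.pyRange 15 (-1) (-1) =
      [15, 14, 13, 12, 11, 10, 9, 8, 7, 6, 5, 4, 3, 2, 1, 0] := by decide

theorem pvMasked_lt (x : Int) : (x.emod (2 ^ 64)).toNat < 16 ^ 16 := by
  have h1 : x.emod (2 ^ 64) < 2 ^ 64 := Int.emod_lt_of_pos x (by norm_num)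
  have : (16 : Nat) ^ 16 = 2 ^ 64 := by norm_num
  rw [this]
  omega

-- ===== VERDICT (by name: the statement is the Claim_ definition above) =====
theorem hex_u64_spec : Claim_equal_hex_u64 := by
  intro x _
  show hex_u64 x = hex_u64_alt x
  unfold hex_u64 hex_u64_alt
  rw [pvRange_eval]
  set n := (x.emod (2 ^ 64)).toNat with hn
  have hpad :
      (List.replicate (16 - (if n = 0 then ['0'] else pvHexRec n).length) '0' ++
        (if n = 0 then ['0'] else pvHexRec n)) = pvDigitsK 16 n := by
    by_cases h0 : n = 0
    · rw [if_pos h0, h0]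
      simp [pvDigitsK_zero, List.replicate]
    · rw [if_neg h0]
      exact pvHexRec_pad 16 n (pvMasked_lt x)
  simp only [hpad]
  simp [List.foldl, List.set, List.replicate, pvDigitsK]
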